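-- pv_equiv track=rewrite | github.com/Hyraland/NLP | word2vec.py | word2idx_wordcount
-- ===== SOURCE A (Python) =====
-- def word2idx_wordcount(sentences, limit = 0):
--     count = 0
--     wordidx = {}
--     wordcount = {}
--     for sentence in sentences:
--         for s in sentence:
--             if s not in wordidx:
--                 wordidx[s] = count
--                 wordcount[s] = 1
--                 count += 1
--             else:
--                 wordcount[s] += 1
--     return wordidx, wordcount
-- ===== SOURCE B (Python) =====
-- def word2idx_wordcount(sentences, limit=0):
--     words = [w for sentence in sentences for w in sentence]
--     wordcount = {}
--     for w in words:
--         wordcount[w] = wordcount.get(w, 0) + 1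
--     wordidx = {w: i for i, w in enumerate(wordcount)}
--     return wordidx, wordcount
-- ===== Notes on version B (the rewrite author's own statement) =====
-- stated objective: idiomatic
-- what changed: B flattens the sentences and counts in one branch-free pass (dict.get default), then derives wordidx afterwards by enumerating wordcount's keys, instead of A's nested loop that maintains a running counter and both dicts with a membership branch.
import Mathlib
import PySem

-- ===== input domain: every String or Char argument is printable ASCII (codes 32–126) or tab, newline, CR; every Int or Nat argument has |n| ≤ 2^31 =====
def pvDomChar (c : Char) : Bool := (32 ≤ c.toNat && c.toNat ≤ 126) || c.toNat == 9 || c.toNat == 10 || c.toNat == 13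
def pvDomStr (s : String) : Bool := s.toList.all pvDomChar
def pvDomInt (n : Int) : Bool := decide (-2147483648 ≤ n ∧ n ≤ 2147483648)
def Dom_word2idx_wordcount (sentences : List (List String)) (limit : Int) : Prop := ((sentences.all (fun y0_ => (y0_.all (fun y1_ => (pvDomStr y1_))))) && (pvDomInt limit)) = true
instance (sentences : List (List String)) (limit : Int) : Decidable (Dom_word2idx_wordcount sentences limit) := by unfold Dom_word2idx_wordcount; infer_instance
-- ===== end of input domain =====

-- B builds wordcount alone in a branch-free counting pass over the flattened tokens and derives
-- wordidx afterwards by enumerating wordcount's keys, instead of A's nested loop that maintains a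
-- running counter and both dicts with a membership branch (objective: idiomatic; not claimed faster).

-- ===== PORT A =====
def word2idx_wordcount (sentences : List (List String)) (limit : Int) : (List (String × Int)) × (List (String × Int)) :=
  -- count = 0; wordidx = {}; wordcount = {}
  let st := sentences.foldl
    (fun (st : Int × PySem.Dict String Int × PySem.Dict String Int) sentence =>
      sentence.foldl
        (fun st s =>
          if st.2.1.contains s = false then
            -- wordidx[s] = count; wordcount[s] = 1; count += 1
            (st.1 + 1, st.2.1.insert s st.1, st.2.2.insert s 1)
          else
            -- wordcount[s] += 1
            (st.1, st.2.1, st.2.2.modify s 0 (· + 1)))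
        st)
    (0, PySem.Dict.empty, PySem.Dict.empty)
  (st.2.1.items, st.2.2.items)

-- ===== PORT B =====
def word2idx_wordcount_alt (sentences : List (List String)) (limit : Int) : (List (String × Int)) × (List (String × Int)) :=
  -- words = [w for sentence in sentences for w in sentence]
  let words := sentences.flatMap (fun sentence => sentence)
  -- wordcount[w] = wordcount.get(w, 0) + 1   for w in words
  let wordcount := words.foldl (fun d w => d.modify w 0 (· + 1)) PySem.Dict.empty
  -- wordidx = {w: i for i, w in enumerate(wordcount)}
  let wordidx := (PySem.List.enumerate wordcount.keys 0).map (fun p => (p.2, p.1))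
  (wordidx, wordcount.items)

-- ===== PRECONDITION & SPEC =====
def Spec_word2idx_wordcount (sentences : List (List String)) (limit : Int) (out : (List (String × Int)) × (List (String × Int))) : Prop := out = word2idx_wordcount_alt sentences limit
instance (sentences : List (List String)) (limit : Int) (out : (List (String × Int)) × (List (String × Int))) : Decidable (Spec_word2idx_wordcount sentences limit out) := by unfold Spec_word2idx_wordcount; infer_instance

-- ===== CLAIM (what is proved, stated in full; the proofs are below) =====
def Claim_equal_word2idx_wordcount : Prop := ∀ (sentences : List (List String)) (limit : Int), Dom_word2idx_wordcount sentences limit → Spec_word2idx_wordcount sentences limit (word2idx_wordcount sentences limit)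

-- ===== LEMMAS AND PROOFS =====

-- A's inner-loop body and B's counting step, named for the proofs.
def pvStepA (st : Int × PySem.Dict String Int × PySem.Dict String Int) (s : String) :
    Int × PySem.Dict String Int × PySem.Dict String Int :=
  if st.2.1.contains s = false then
    (st.1 + 1, st.2.1.insert s st.1, st.2.2.insert s 1)
  else
    (st.1, st.2.1, st.2.2.modify s 0 (· + 1))

def pvStepB (d : PySem.Dict String Int) (w : String) : PySem.Dict String Int :=
  d.modify w 0 (· + 1)

-- wordidx as a function of wordcount: key k ↦ position of k in wordcount's key list.
def pvMkIdx (d : PySem.Dict String Int) : PySem.Dict String Int :=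
  PySem.Dict.mk ((PySem.List.enumerate d.keys 0).map (fun p => (p.2, p.1)))

theorem pvMkIdx_keys (d : PySem.Dict String Int) : (pvMkIdx d).keys = d.keys := by
  simp [pvMkIdx, PySem.Dict.keys, Function.comp_def, PySem.List.map_snd_enumerate]

-- a nested for-loop is the loop over the flattened list
theorem pv_foldl_flat {α β : Type} (f : β → α → β) :
    ∀ (xss : List (List α)) (init : β),
      xss.foldl (fun st xs => xs.foldl f st) init = (xss.flatMap (fun xs => xs)).foldl f init := by
  intro xss
  induction xss with
  | nil => intro init; rfl
  | cons xs rest ih => intro init; simp [List.foldl_append, ih]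

-- main invariant: starting from any count dict with distinct keys, A's state stays
-- (size, pvMkIdx of the count dict, the count dict) while B's counting loop runs.
theorem pv_invariant :
    ∀ (ws : List String) (cnt : PySem.Dict String Int), cnt.keys.Nodup →
      ws.foldl pvStepA ((cnt.size : Int), pvMkIdx cnt, cnt)
        = (((ws.foldl pvStepB cnt).size : Int), pvMkIdx (ws.foldl pvStepB cnt), ws.foldl pvStepB cnt) := by
  intro ws
  induction ws with
  | nil => intro cnt h; rfl
  | cons w rest ih =>
    intro cnt h
    have hkeys : (pvMkIdx cnt).contains w = cnt.contains w := by
      rw [PySem.Dict.contains_eq_decide_mem_keys, PySem.Dict.contains_eq_decide_mem_keys, pvMkIdx_keys]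
    have hstep : pvStepA ((cnt.size : Int), pvMkIdx cnt, cnt) w
        = (((pvStepB cnt w).size : Int), pvMkIdx (pvStepB cnt w), pvStepB cnt w) := by
      by_cases hc : cnt.contains w = true
      · -- already present: count and wordidx unchanged, size and keys unchanged
        have hkB : (pvStepB cnt w).keys = cnt.keys := by
          show (cnt.insert w (cnt.getD w 0 + 1)).keys = cnt.keys
          exact PySem.Dict.keys_insert_of_contains cnt _ hc
        have hszB : (pvStepB cnt w).size = cnt.size := by
          have := congrArg List.length hkB
          simpa [PySem.Dict.size, PySem.Dict.keys] using this
        have hmkB : pvMkIdx (pvStepB cnt w) = pvMkIdx cnt := by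
          unfold pvMkIdx; rw [hkB]
        simp only [pvStepA, hkeys, hc]
        rw [hszB, hmkB]
        simp [pvStepB]
      · -- fresh key: A appends it to wordidx with the running count = current size
        have hc' : cnt.contains w = false := by simpa using hc
        have hgd : cnt.getD w 0 = 0 := PySem.Dict.getD_of_not_contains cnt 0 hc'
        have hcntB : pvStepB cnt w = cnt.insert w 1 := by
          show cnt.insert w (cnt.getD w 0 + 1) = cnt.insert w 1
          rw [hgd]; norm_num
        have hkB : (cnt.insert w 1).keys = cnt.keys ++ [w] :=
          PySem.Dict.keys_insert_of_not_contains cnt 1 hc'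
        have hwnot : w ∉ (pvMkIdx cnt).keys := by
          rw [pvMkIdx_keys]
          intro hmem
          rw [PySem.Dict.contains_eq_decide_mem_keys] at hc'
          simp [hmem] at hc'
        have hidxnot : (pvMkIdx cnt).contains w = false := by
          rw [PySem.Dict.contains_eq_decide_mem_keys]; simp [hwnot]
        have hsize : cnt.size = cnt.keys.length := by
          simp [PySem.Dict.size, PySem.Dict.keys]
        have hidx : (pvMkIdx cnt).insert w (cnt.size : Int) = pvMkIdx (cnt.insert w 1) := by
          apply PySem.Dict.ext
          rw [PySem.Dict.items_insert_of_not_contains _ _ hidxnot]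
          show (pvMkIdx cnt).items ++ [(w, (cnt.size : Int))]
              = (PySem.List.enumerate (cnt.insert w 1).keys 0).map (fun p => (p.2, p.1))
          rw [hkB, PySem.List.enumerate_append]
          simp [pvMkIdx, hsize]
        have hsz : ((cnt.insert w 1).size : Int) = (cnt.size : Int) + 1 := by
          have := congrArg List.length hkB
          simp [PySem.Dict.size, PySem.Dict.keys] at this ⊢
          omega
        simp only [pvStepA, hkeys, hc']
        rw [hcntB]
        rw [hsz, ← hidx]
        simp
    rw [List.foldl_cons, hstep, List.foldl_cons]
    refine ih (pvStepB cnt w) ?_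
    show (cnt.insert w (cnt.getD w 0 + 1)).keys.Nodup
    exact PySem.Dict.nodup_keys_insert cnt w _ h

-- ===== VERDICT (by name: the statement is the Claim_ definition above) =====
theorem word2idx_wordcount_spec : Claim_equal_word2idx_wordcount := by
  intro sentences limit _
  show word2idx_wordcount sentences limit = word2idx_wordcount_alt sentences limit
  unfold word2idx_wordcount word2idx_wordcount_alt
  have h0 : sentences.foldl
      (fun (st : Int × PySem.Dict String Int × PySem.Dict String Int) sentence =>
        sentence.foldl
          (fun st s =>
            if st.2.1.contains s = false then
              (st.1 + 1, st.2.1.insert s st.1, st.2.2.insert s 1)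
            else
              (st.1, st.2.1, st.2.2.modify s 0 (· + 1)))
          st)
      (0, PySem.Dict.empty, PySem.Dict.empty)
      = (sentences.flatMap (fun xs => xs)).foldl pvStepA (0, PySem.Dict.empty, PySem.Dict.empty) :=
    pv_foldl_flat pvStepA sentences (0, PySem.Dict.empty, PySem.Dict.empty)
  rw [h0]
  have hinv := pv_invariant (sentences.flatMap (fun xs => xs)) PySem.Dict.empty (by
    simp [PySem.Dict.keys, PySem.Dict.empty])
  have hinit : ((PySem.Dict.empty : PySem.Dict String Int).size : Int) = 0 := rfl
  have hmk : pvMkIdx (PySem.Dict.empty : PySem.Dict String Int) = PySem.Dict.empty := rfl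
  rw [hinit, hmk] at hinv
  rw [hinv]
  rfl
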